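-- pv_equiv track=rewrite | github.com/dpvdberg/adventofcode2019 | Python/Solutions/Day6/orbit.py | orbitals
-- ===== SOURCE A (Python) =====
-- def orbitals(m, point):
--     if point in m:
--         orbit_point = m[point]
--         l = [orbit_point]
--         l.extend(orbitals(m, orbit_point))
--         return l
--     else:
--         return []
-- ===== SOURCE B (Python) =====
-- def orbitals(m, point):
--     # Pass 1: measure the length of the orbit chain starting at point.
--     d = 0
--     q = point
--     while q in m:
--         q = m[q]
--         d += 1
--     # Pass 2: materialize the chain of that exact length.
--     out = [None] * d
--     q = point
--     for i in range(d):
--         q = m[q]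
--         out[i] = q
--     return out
-- ===== Notes on version B (the rewrite author's own statement) =====
-- stated objective: alternative
-- what changed: Replaces A's list-building recursion by a two-pass scheme: a first walk only counts the chain depth, then a second pass of exactly that many lookups fills a preallocated list.
import Mathlib
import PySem

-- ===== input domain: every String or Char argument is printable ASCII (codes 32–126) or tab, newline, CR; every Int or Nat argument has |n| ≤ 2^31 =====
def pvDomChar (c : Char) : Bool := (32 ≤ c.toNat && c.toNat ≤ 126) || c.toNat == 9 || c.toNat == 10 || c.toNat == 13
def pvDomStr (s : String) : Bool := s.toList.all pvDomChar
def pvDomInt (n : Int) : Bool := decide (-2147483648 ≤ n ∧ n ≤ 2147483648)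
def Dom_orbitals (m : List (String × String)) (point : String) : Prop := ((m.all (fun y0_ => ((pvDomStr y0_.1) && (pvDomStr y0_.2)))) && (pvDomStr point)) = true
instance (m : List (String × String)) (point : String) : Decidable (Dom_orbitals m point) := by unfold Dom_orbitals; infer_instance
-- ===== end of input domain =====

-- ===== PORT A =====
-- B replaces A's list-building recursion by two passes (count the depth, then fill);
-- Pre_ excludes cyclic orbit maps, on which A raises RecursionError.
-- Port of A's recursion, made total with a fuel guard (m.length + 1 steps suffice on every Pre_ input).
def orbitalsGo (m : List (String × String)) : Nat → String → List String
  | 0, _ => []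
  | fuel + 1, point =>
    match m.lookup point with
    | some orbit_point => orbit_point :: orbitalsGo m fuel orbit_point
    | none => []

def orbitals (m : List (String × String)) (point : String) : List String :=
  orbitalsGo m (m.length + 1) point

-- ===== PORT B =====
-- Pass 1 of Source B: count the chain depth (same fuel guard as A's port).
def pvDepth (m : List (String × String)) : Nat → String → Nat
  | 0, _ => 0
  | fuel + 1, q =>
    match m.lookup q with
    | some p => pvDepth m fuel p + 1
    | none => 0

-- Pass 2 of Source B: perform exactly d lookups, writing each parent into the output.
-- (In Source B `m[q]` never misses on this pass; `.getD q` is an arbitrary total-ization never reached.)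
def pvFill (m : List (String × String)) : Nat → String → List String
  | 0, _ => []
  | d + 1, q =>
    let p := (m.lookup q).getD q
    p :: pvFill m d p

def orbitals_alt (m : List (String × String)) (point : String) : List String :=
  pvFill m (pvDepth m (m.length + 1) point) point

-- ===== PRECONDITION & SPEC =====
-- one step of the orbit chain (a point with no parent stays put)
def pvStep (m : List (String × String)) (q : String) : String := (m.lookup q).getD q

-- Pre_ excludes inputs whose orbit chain from point is cyclic: there A raises RecursionError
-- (and B's first loop does not terminate). On acyclic maps the chain leaves the keys within m.length steps.
def Pre_orbitals (m : List (String × String)) (point : String) : Prop :=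
  m.lookup ((pvStep m)^[m.length] point) = none
instance (m : List (String × String)) (point : String) : Decidable (Pre_orbitals m point) := by
  unfold Pre_orbitals; infer_instance

def pvWitness_orbitals : (List (String × String)) × String := ([("A", "B")], "A")

def Spec_orbitals (m : List (String × String)) (point : String) (out : List String) : Prop := out = orbitals_alt m point
instance (m : List (String × String)) (point : String) (out : List String) : Decidable (Spec_orbitals m point out) := by unfold Spec_orbitals; infer_instance

-- ===== CLAIM (what is proved, stated in full; the proofs are below) =====
def Claim_equal_orbitals : Prop := ∀ (m : List (String × String)) (point : String), Dom_orbitals m point → Pre_orbitals m point → Spec_orbitals m point (orbitals m point)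

-- ===== LEMMAS AND PROOFS =====
-- Filling for the measured depth reproduces A's recursion (for any fuel).
theorem fill_depth_eq (m : List (String × String)) (fuel : Nat) :
    ∀ point : String, pvFill m (pvDepth m fuel point) point = orbitalsGo m fuel point := by
  induction fuel with
  | zero => intro point; simp [pvDepth, pvFill, orbitalsGo]
  | succ n ih =>
    intro point
    simp only [pvDepth, orbitalsGo]
    cases h : m.lookup point with
    | none => simp [pvFill]
    | some p => simp [pvFill, h, ih]

-- ===== VERDICT (by name: the statement is the Claim_ definition above) =====
theorem orbitals_spec : Claim_equal_orbitals := by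
  intro m point _ _
  unfold Spec_orbitals orbitals orbitals_alt
  simp [fill_depth_eq]
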